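-- pv_equiv track=rewrite | github.com/igcarras/EDA | examenes/23-24 FINAL ORD/p2 divide.py | _count_ideal_couples
-- ===== SOURCE A (Python) =====
-- def _count_ideal_couples(a: list, b: list, start:int, end:int) -> int:
--     if start == end:
--         if (a[start] % 2 == 0 and b[start] % 2 != 0) or (a[start] % 2 != 0 and b[end] % 2 == 0):
--             return 1
--         return 0
--
--     m = (start+end)//2
--
--     num_par1 = _count_ideal_couples(a,b, start,m)
--     num_par2 = _count_ideal_couples(a,b, m+1,end)
--
--     return  num_par1 + num_par2
-- ===== SOURCE B (Python) =====
-- def _count_ideal_couples(a: list, b: list, start: int, end: int) -> int: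
--     # single linear pass over [start, end]; like A it assumes the contract start <= end
--     # (the range is non-empty), so at least one element is examined
--     count = 0
--     i = start
--     while True:
--         if (a[i] + b[i]) % 2 != 0:
--             count += 1
--         if i == end:
--             break
--         i += 1
--     return count
-- ===== Notes on version B (the rewrite author's own statement) =====
-- stated objective: simpler
-- what changed: Replaces the divide-and-conquer recursion with a single linear do-while pass over [start, end] that counts indices where a[i]+b[i] is odd (the two-clause parity test collapsed into one sum-parity test).
import Mathlib
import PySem

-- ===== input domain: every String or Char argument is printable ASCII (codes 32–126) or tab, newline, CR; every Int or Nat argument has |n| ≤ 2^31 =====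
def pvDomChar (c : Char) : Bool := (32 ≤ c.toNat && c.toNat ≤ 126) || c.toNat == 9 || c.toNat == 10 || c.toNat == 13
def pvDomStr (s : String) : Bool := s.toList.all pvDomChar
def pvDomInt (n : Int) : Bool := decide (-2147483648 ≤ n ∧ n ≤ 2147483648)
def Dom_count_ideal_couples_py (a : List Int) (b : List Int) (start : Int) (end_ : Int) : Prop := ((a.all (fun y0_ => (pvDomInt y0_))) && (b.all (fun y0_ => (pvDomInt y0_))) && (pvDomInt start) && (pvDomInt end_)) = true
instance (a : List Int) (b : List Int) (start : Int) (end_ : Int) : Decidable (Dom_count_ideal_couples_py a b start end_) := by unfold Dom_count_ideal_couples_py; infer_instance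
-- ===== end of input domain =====

-- B replaces A's divide-and-conquer recursion by one linear do-while pass over [start, end_]
-- counting indices where a[i]+b[i] is odd (objective: simpler).


-- ===== PORT A =====
-- Literal port of A.  Indexing uses pyGet? (negative-index wraparound, exact); Pre_ below
-- guarantees every accessed index is in range, so the `.getD 0` default is never the result.
-- The `else 0` branch guards termination where Python recurses forever (end_ < start,
-- RecursionError); those inputs are outside Pre_.
def count_ideal_couples_py (a : List Int) (b : List Int) (start : Int) (end_ : Int) : Int :=
  if start = end_ then
    if (PySem.Int.mod ((PySem.List.pyGet? a start).getD 0) 2 = 0 ∧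
          PySem.Int.mod ((PySem.List.pyGet? b start).getD 0) 2 ≠ 0) ∨
       (PySem.Int.mod ((PySem.List.pyGet? a start).getD 0) 2 ≠ 0 ∧
          PySem.Int.mod ((PySem.List.pyGet? b end_).getD 0) 2 = 0) then 1 else 0
  else if h : start < end_ then
    let m := PySem.Int.floordiv (start + end_) 2
    count_ideal_couples_py a b start m + count_ideal_couples_py a b (m + 1) end_
  else 0
termination_by (end_ - start).toNat
decreasing_by
  all_goals
    have hm1 : start ≤ PySem.Int.floordiv (start + end_) 2 :=
      (PySem.Int.floordiv_two_mid_bounds (le_of_lt h)).1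
    have hm2 : PySem.Int.floordiv (start + end_) 2 < end_ :=
      (PySem.Int.floordiv_lt_iff_lt_mul (a := start + end_) (b := 2) (q := end_) (by omega)).2 (by omega)
    omega

-- ===== PORT B =====
-- Literal port of B's do-while loop.  The body runs once, then the loop continues while
-- i ≠ end_.  The `else` branch guards termination where Python's loop has left the range
-- (end_ < i: Python then runs on to an IndexError); those inputs are outside Pre_.
def count_ideal_couples_py_alt_loop (a : List Int) (b : List Int) (end_ : Int) (i : Int) (count : Int) : Int :=
  let count' :=
    if PySem.Int.mod ((PySem.List.pyGet? a i).getD 0 + (PySem.List.pyGet? b i).getD 0) 2 ≠ 0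
    then count + 1 else count
  if i = end_ then count'
  else if h : i < end_ then count_ideal_couples_py_alt_loop a b end_ (i + 1) count'
  else count'
termination_by (end_ - i).toNat
decreasing_by omega

def count_ideal_couples_py_alt (a : List Int) (b : List Int) (start : Int) (end_ : Int) : Int :=
  count_ideal_couples_py_alt_loop a b end_ start 0

-- ===== PRECONDITION & SPEC =====
-- Pre_ is exactly where Python A returns: start ≤ end_ (otherwise the recursion never
-- terminates: RecursionError) and every index in [start, end_] valid for both lists
-- (otherwise IndexError at some leaf); negative in-range indices wrap as in Python.
def Pre_count_ideal_couples_py (a : List Int) (b : List Int) (start : Int) (end_ : Int) : Prop :=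
  start ≤ end_ ∧ -(a.length : Int) ≤ start ∧ end_ < (a.length : Int) ∧
    -(b.length : Int) ≤ start ∧ end_ < (b.length : Int)
instance (a : List Int) (b : List Int) (start : Int) (end_ : Int) : Decidable (Pre_count_ideal_couples_py a b start end_) := by unfold Pre_count_ideal_couples_py; infer_instance

def pvWitness_count_ideal_couples_py : List Int × List Int × Int × Int := ([2, 3], [1, 4], 0, 1)

def Spec_count_ideal_couples_py (a : List Int) (b : List Int) (start : Int) (end_ : Int) (out : Int) : Prop := out = count_ideal_couples_py_alt a b start end_
instance (a : List Int) (b : List Int) (start : Int) (end_ : Int) (out : Int) : Decidable (Spec_count_ideal_couples_py a b start end_ out) := by unfold Spec_count_ideal_couples_py; infer_instance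

-- ===== CLAIM (what is proved, stated in full; the proofs are below) =====
def Claim_equal_count_ideal_couples_py : Prop := ∀ (a : List Int) (b : List Int) (start : Int) (end_ : Int), Dom_count_ideal_couples_py a b start end_ → Pre_count_ideal_couples_py a b start end_ → Spec_count_ideal_couples_py a b start end_ (count_ideal_couples_py a b start end_)

-- ===== LEMMAS AND PROOFS =====

-- the 0/1 indicator both programs count with, and the counted sum over [s, e]
def pvIdealInd (a : List Int) (b : List Int) (i : Int) : Int :=
  if PySem.Int.mod ((PySem.List.pyGet? a i).getD 0 + (PySem.List.pyGet? b i).getD 0) 2 ≠ 0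
  then 1 else 0

def pvIdealSum (a : List Int) (b : List Int) (s : Int) (e : Int) : Int :=
  ((PySem.List.pyRange s (e + 1) 1).map (pvIdealInd a b)).sum

-- A's leaf parity test equals B's sum-parity test.
lemma parity_pred_iff (x y : Int) :
    ((PySem.Int.mod x 2 = 0 ∧ PySem.Int.mod y 2 ≠ 0) ∨
      (PySem.Int.mod x 2 ≠ 0 ∧ PySem.Int.mod y 2 = 0)) ↔ PySem.Int.mod (x + y) 2 ≠ 0 := by
  simp only [PySem.Int.mod_eq_emod_of_pos (show (0:Int) < 2 by omega)]
  omega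

-- A's divide-and-conquer recursion computes the 0/1 sum (for every start/end_;
-- when end_ < start both sides are 0).
lemma a_eq_sum (a b : List Int) (n : Nat) :
    ∀ s e : Int, (e - s).toNat ≤ n →
      count_ideal_couples_py a b s e = pvIdealSum a b s e := by
  induction n with
  | zero =>
    intro s e hn
    rw [count_ideal_couples_py]
    by_cases h : s = e
    · subst h
      rw [pvIdealSum, PySem.List.pyRange_one_singleton]
      simp only [List.map_cons, List.map_nil, List.sum_cons, List.sum_nil, add_zero, pvIdealInd]
      have hiff := parity_pred_iff ((PySem.List.pyGet? a s).getD 0) ((PySem.List.pyGet? b s).getD 0)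
      split_ifs with h1 h2 h3 <;> first | rfl | omega
    · rw [if_neg h, dif_neg (by omega), pvIdealSum, PySem.List.pyRange_one_eq_nil (by omega)]
      simp
  | succ n ih =>
    intro s e hn
    by_cases h : s = e
    · exact ih s e (by omega)
    · by_cases hlt : s < e
      · rw [count_ideal_couples_py, if_neg h, dif_pos hlt]
        have hm1 : s ≤ PySem.Int.floordiv (s + e) 2 := (PySem.Int.floordiv_two_mid_bounds (le_of_lt hlt)).1
        set m := PySem.Int.floordiv (s + e) 2 with hm
        have hm2 : m < e := by
          have := (PySem.Int.floordiv_lt_iff_lt_mul (a := s + e) (b := 2) (q := e) (by omega)).2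
          exact this (by omega)
        show count_ideal_couples_py a b s m + count_ideal_couples_py a b (m + 1) e = _
        rw [ih s m (by omega), ih (m + 1) e (by omega)]
        rw [pvIdealSum, pvIdealSum, pvIdealSum,
            PySem.List.pyRange_one_append s (m + 1) (e + 1) (by omega) (by omega)]
        rw [List.map_append, List.sum_append]
      · exact ih s e (by omega)

-- peel the first index off the counted range
lemma sum_peel (a b : List Int) (i e : Int) (h : i ≤ e) :
    pvIdealSum a b i e = pvIdealInd a b i + pvIdealSum a b (i + 1) e := by
  rw [pvIdealSum, PySem.List.pyRange_one_cons (by omega), List.map_cons, List.sum_cons]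
  rfl

-- B's do-while loop adds the 0/1 sum over [i, e] to its accumulator, for i ≤ e.
lemma loop_eq_sum (a b : List Int) (n : Nat) :
    ∀ i e c : Int, (e - i).toNat ≤ n → i ≤ e →
      count_ideal_couples_py_alt_loop a b e i c = c + pvIdealSum a b i e := by
  induction n with
  | zero =>
    intro i e c hn hie
    have h : i = e := by omega
    subst h
    rw [count_ideal_couples_py_alt_loop, if_pos rfl,
        pvIdealSum, PySem.List.pyRange_one_singleton]
    simp only [List.map_cons, List.map_nil, List.sum_cons, List.sum_nil, add_zero, pvIdealInd]
    split_ifs <;> ring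
  | succ n ih =>
    intro i e c hn hie
    by_cases h : i = e
    · exact ih i e c (by omega) hie
    · rw [count_ideal_couples_py_alt_loop, if_neg h, dif_pos (by omega)]
      rw [ih (i + 1) e _ (by omega) (by omega), sum_peel a b i e hie, pvIdealInd]
      split_ifs <;> ring

-- ===== VERDICT (by name: the statement is the Claim_ definition above) =====
theorem count_ideal_couples_py_spec : Claim_equal_count_ideal_couples_py := by
  intro a b start end_ _ hpre
  unfold Spec_count_ideal_couples_py count_ideal_couples_py_alt
  rw [loop_eq_sum a b (end_ - start).toNat start end_ 0 le_rfl hpre.1,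
      a_eq_sum a b (end_ - start).toNat start end_ le_rfl]
  ring
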